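-- pv_equiv track=rewrite | github.com/jinyoung7165/2023Sane | 프로그래머스_고득점kit/BruteForce/모의고사.py | solution
-- ===== SOURCE A (Python) =====
-- second = [2,1, 2,3, 2,4, 2,5]
--
-- third = [3,3, 1,1, 2,2, 4,4, 5,5]
--
-- def solution(answers):
--     score = [0,0,0]
--     answer = []
--     for idx, an in enumerate(answers):
--         if an == (idx % 5) +1:
--             score[0] += 1
--
--         if second[idx % len(second)] == an:
--             score[1] += 1
--         if third[idx % len(third)] == an:
--             score[2] += 1
--
--     for idx, s in enumerate(score):
--         if s == max(score):
--             answer.append(idx+1)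
--     return answer
-- ===== SOURCE B (Python) =====
-- second = [2,1, 2,3, 2,4, 2,5]
--
-- third = [3,3, 1,1, 2,2, 4,4, 5,5]
--
-- PERIOD = 40  # lcm of the three pattern lengths (5, 8, 10)
--
-- def solution(answers):
--     # Aggregate the answers once into a counter keyed by (position mod 40, value);
--     # each pattern's score is then read off with 40 dictionary lookups.
--     counts = {}
--     for i, a in enumerate(answers):
--         k = (i % PERIOD, a)
--         counts[k] = counts.get(k, 0) + 1
--     patterns = [[1, 2, 3, 4, 5], second, third]
--     scores = [sum(counts.get((r, p[r % len(p)]), 0) for r in range(PERIOD))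
--               for p in patterns]
--     m = max(scores)
--     return [i + 1 for i, s in enumerate(scores) if s == m]
-- ===== Notes on version B (the rewrite author's own statement) =====
-- stated objective: alternative
-- what changed: Instead of scoring the patterns while scanning the answers, B aggregates the answers once into a dictionary counter keyed by (index mod 40, value) -- 40 being the lcm of the three pattern lengths -- and then derives each pattern's score from 40 dictionary lookups, so no pattern is ever compared against the answers element by element.
import Mathlib
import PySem

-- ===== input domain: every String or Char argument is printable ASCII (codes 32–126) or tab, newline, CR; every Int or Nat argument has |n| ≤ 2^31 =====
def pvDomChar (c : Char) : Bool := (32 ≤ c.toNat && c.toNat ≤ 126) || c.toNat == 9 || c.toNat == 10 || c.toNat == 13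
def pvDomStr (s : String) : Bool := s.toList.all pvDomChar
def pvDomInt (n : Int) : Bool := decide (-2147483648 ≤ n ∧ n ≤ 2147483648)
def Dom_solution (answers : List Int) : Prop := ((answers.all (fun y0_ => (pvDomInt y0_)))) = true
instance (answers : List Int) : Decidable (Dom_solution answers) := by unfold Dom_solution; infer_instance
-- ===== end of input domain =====

-- B replaces the per-element pattern comparisons by one counter keyed by (index mod 40, value)
-- (40 = lcm of the pattern lengths) from which each pattern's score is read off by 40 lookups
-- (alternative data structure, same asymptotic cost).

-- ===== PORT A =====
def pySecond : List Int := [2,1, 2,3, 2,4, 2,5]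
def pyThird : List Int := [3,3, 1,1, 2,2, 4,4, 5,5]

-- the single interleaved loop of A over (idx, an), carrying the three scores
def loopA : List Int → Nat → Int × Int × Int → Int × Int × Int
  | [], _, s => s
  | an :: rest, idx, (s1, s2, s3) =>
      let s1 := if an = ((idx % 5 : Nat) : Int) + 1 then s1 + 1 else s1
      let s2 := if pySecond.getD (idx % pySecond.length) 0 = an then s2 + 1 else s2
      let s3 := if pyThird.getD (idx % pyThird.length) 0 = an then s3 + 1 else s3
      loopA rest (idx + 1) (s1, s2, s3)

def solution (answers : List Int) : List Int :=
  let score := loopA answers 0 (0, 0, 0)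
  let scoreList := [score.1, score.2.1, score.2.2]
  -- second loop: for idx, s in enumerate(score): if s == max(score): answer.append(idx+1)
  (PySem.List.enumerate scoreList).foldl
    (fun acc p => if p.2 = (PySem.List.max? scoreList (fun y => y)).getD 0 then acc ++ [p.1 + 1] else acc) []

-- ===== PORT B =====
def patternsB : List (List Int) := [[1, 2, 3, 4, 5], [2,1, 2,3, 2,4, 2,5], [3,3, 1,1, 2,2, 4,4, 5,5]]

-- for i, a in enumerate(answers): k = (i % 40, a); counts[k] = counts.get(k, 0) + 1
def countsB (answers : List Int) : PySem.Dict (Int × Int) Int :=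
  (PySem.List.enumerate answers).foldl
    (fun d q => d.insert (PySem.Int.mod q.1 40, q.2) (d.getD (PySem.Int.mod q.1 40, q.2) 0 + 1))
    PySem.Dict.empty

-- sum(counts.get((r, p[r % len(p)]), 0) for r in range(40))
def scoreAlt (counts : PySem.Dict (Int × Int) Int) (p : List Int) : Int :=
  ((PySem.List.pyRange 0 40 1).map
    (fun r => counts.getD (r, PySem.List.pyGetD p (PySem.Int.mod r (p.length : Int)) 0) 0)).sum

def solution_alt (answers : List Int) : List Int :=
  let counts := countsB answers
  let scores := patternsB.map (fun p => scoreAlt counts p)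
  let m := (PySem.List.max? scores (fun y => y)).getD 0
  ((PySem.List.enumerate scores).filter (fun p => p.2 == m)).map (fun p => p.1 + 1)

-- ===== PRECONDITION & SPEC =====
def Spec_solution (answers : List Int) (out : List Int) : Prop := out = solution_alt answers
instance (answers : List Int) (out : List Int) : Decidable (Spec_solution answers out) := by unfold Spec_solution; infer_instance

-- ===== CLAIM (what is proved, stated in full; the proofs are below) =====
def Claim_equal_solution : Prop := ∀ (answers : List Int), Dom_solution answers → Spec_solution answers (solution answers)

-- ===== LEMMAS AND PROOFS =====

-- bridge spec: the per-pattern match count, by structural recursion with a running index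
def scoreB (p : List Int) : List Int → Nat → Int
  | [], _ => 0
  | a :: rest, i => (if p.getD (i % p.length) 0 = a then 1 else 0) + scoreB p rest (i + 1)

lemma firstPat_getD : ∀ k < 5, ([1, 2, 3, 4, 5] : List Int).getD k 0 = (k : Int) + 1 := by decide

lemma loopA_eq (ans : List Int) : ∀ (i : Nat) (s1 s2 s3 : Int),
    loopA ans i (s1, s2, s3) =
      (s1 + scoreB [1, 2, 3, 4, 5] ans i,
       s2 + scoreB pySecond ans i,
       s3 + scoreB pyThird ans i) := by
  induction ans with
  | nil => intro i s1 s2 s3; simp [loopA, scoreB]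
  | cons a rest ih =>
      intro i s1 s2 s3
      have h1 : ([1, 2, 3, 4, 5] : List Int).getD (i % 5) 0 = ((i % 5 : Nat) : Int) + 1 :=
        firstPat_getD _ (Nat.mod_lt _ (by omega))
      simp only [loopA, scoreB, ih, Prod.mk.injEq]
      refine ⟨?_, ?_, ?_⟩
      · have hl : ([1, 2, 3, 4, 5] : List Int).length = 5 := by simp
        rw [hl, h1]
        rcases eq_or_ne a (((i % 5 : Nat) : Int) + 1) with h | h
        · rw [if_pos h, if_pos h.symm]; ring
        · rw [if_neg h, if_neg (fun e => h e.symm)]; ring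
      · by_cases h : pySecond.getD (i % pySecond.length) 0 = a <;> simp only [h, ite_true, ite_false] <;> ring
      · by_cases h : pyThird.getD (i % pyThird.length) 0 = a <;> simp only [h, ite_true, ite_false] <;> ring

-- sum over range n of a point mass at m
lemma sum_range_point (X : Int) : ∀ (n m : Nat), m < n →
    ((List.range n).map (fun k => if k = m then X else 0)).sum = X := by
  intro n
  induction n with
  | zero => intro m h; omega
  | succ n ih =>
      intro m h
      rw [List.range_succ, List.map_append, List.sum_append]
      by_cases hm : m = n
      · subst hm
        have : ((List.range m).map (fun k => if k = m then X else 0)).sum = 0 := by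
          rw [List.sum_eq_zero]; intro x hx
          simp only [List.mem_map, List.mem_range] at hx
          obtain ⟨k, hk, rfl⟩ := hx
          simp [Nat.ne_of_lt hk]
        simp [this]
      · have hm' : m < n := by omega
        rw [ih m hm']
        simp [Ne.symm hm]

-- the counter read back at one key counts the matching (index, value) pairs
lemma countsB_getD (ans : List Int) (k : Int × Int) :
    (countsB ans).getD k 0 =
      ((PySem.List.enumerate ans).map (fun q => (PySem.Int.mod q.1 40, q.2))).count k := by
  unfold countsB
  have h1 := (@List.foldl_map (Int × Int) (Int × Int) (PySem.Dict (Int × Int) Int)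
    (fun q => (PySem.Int.mod q.1 40, q.2))
    (fun d k => d.insert k (d.getD k 0 + 1)) (PySem.List.enumerate ans) PySem.Dict.empty).symm
  rw [h1, PySem.Dict.getD_foldl_insert_add_one]
  simp

-- core: B's 40 lookups for pattern p equal the elementwise match count, when p.length divides 40
lemma scoreAlt_eq (p : List Int) (hdvd : p.length ∣ 40) (ans : List Int) :
    ∀ s : Nat,
      ((PySem.List.pyRange 0 40 1).map
        (fun r => (((PySem.List.enumerate ans (s : Int)).map
            (fun q => (PySem.Int.mod q.1 40, q.2))).count
          (r, PySem.List.pyGetD p (PySem.Int.mod r (p.length : Int)) 0) : Int))).sum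
      = scoreB p ans s := by
  induction ans with
  | nil => intro s; simp [PySem.List.enumerate_nil, scoreB, List.sum_eq_zero]
  | cons a rest ih =>
      intro s
      have hcast : ((s : Int) + 1) = ((s + 1 : Nat) : Int) := by push_cast; ring
      simp only [PySem.List.enumerate_cons, List.map_cons, scoreB]
      -- count over a cons splits into the tail count plus an indicator
      have hsplit : ∀ r : Int,
          ((((PySem.Int.mod (s : Int) 40, a)) ::
              ((PySem.List.enumerate rest ((s : Int) + 1)).map
                (fun q => (PySem.Int.mod q.1 40, q.2)))).count
            (r, PySem.List.pyGetD p (PySem.Int.mod r (p.length : Int)) 0) : Int)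
          = (((PySem.List.enumerate rest ((s : Int) + 1)).map
                (fun q => (PySem.Int.mod q.1 40, q.2))).count
              (r, PySem.List.pyGetD p (PySem.Int.mod r (p.length : Int)) 0) : Int)
            + (if (PySem.Int.mod (s : Int) 40, a)
                  = (r, PySem.List.pyGetD p (PySem.Int.mod r (p.length : Int)) 0)
               then 1 else 0) := by
        intro r
        rw [List.count_cons]
        push_cast
        by_cases h : (PySem.Int.mod (s : Int) 40, a)
            = (r, PySem.List.pyGetD p (PySem.Int.mod r (p.length : Int)) 0)
        · rw [if_pos h, if_pos (beq_iff_eq.mpr h)]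
        · rw [if_neg h, if_neg (by simpa using h)]
      calc ((PySem.List.pyRange 0 40 1).map _).sum
          = ((PySem.List.pyRange 0 40 1).map
              (fun r => (((PySem.List.enumerate rest ((s : Int) + 1)).map
                  (fun q => (PySem.Int.mod q.1 40, q.2))).count
                (r, PySem.List.pyGetD p (PySem.Int.mod r (p.length : Int)) 0) : Int)
                + (if (PySem.Int.mod (s : Int) 40, a)
                      = (r, PySem.List.pyGetD p (PySem.Int.mod r (p.length : Int)) 0)
                   then 1 else 0))).sum := by
            exact congrArg List.sum (List.map_congr_left (fun r _ => hsplit r))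
        _ = _ := by
            rw [PySem.List.sum_map_add_int]
            rw [hcast, ih (s + 1)]
            have hm40 : PySem.Int.mod (s : Int) 40 = ((s % 40 : Nat) : Int) := by
              exact_mod_cast PySem.Int.mod_natCast s 40
            have hvp : PySem.List.pyGetD p (PySem.Int.mod ((s % 40 : Nat) : Int) (p.length : Int)) 0
                = p.getD (s % p.length) 0 := by
              have h1 : PySem.Int.mod ((s % 40 : Nat) : Int) (p.length : Int)
                  = (((s % 40) % p.length : Nat) : Int) := by
                exact_mod_cast PySem.Int.mod_natCast (s % 40) p.length
              rw [h1, PySem.List.pyGetD_natCast, Nat.mod_mod_of_dvd _ hdvd]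
            have hind : ((PySem.List.pyRange 0 40 1).map
                (fun r => if (PySem.Int.mod (s : Int) 40, a)
                    = (r, PySem.List.pyGetD p (PySem.Int.mod r (p.length : Int)) 0)
                  then (1:Int) else 0)).sum
                = (if p.getD (s % p.length) 0 = a then (1:Int) else 0) := by
              rw [PySem.List.pyRange_one]
              rw [List.map_map]
              have h40 : ((40 : Int) - 0).toNat = 40 := rfl
              rw [h40]
              have hterm : ∀ k ∈ List.range 40,
                  ((fun r : Int => if (PySem.Int.mod (s : Int) 40, a)
                      = (r, PySem.List.pyGetD p (PySem.Int.mod r (p.length : Int)) 0)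
                    then (1:Int) else 0) ∘ (fun k : Nat => (0:Int) + k)) k
                  = (if k = s % 40 then (if a = p.getD (s % p.length) 0 then (1:Int) else 0) else 0) := by
                intro k hk
                simp only [Function.comp, zero_add]
                by_cases hks : k = s % 40
                · subst hks
                  rw [if_pos rfl, hm40]
                  by_cases ha : a = p.getD (s % p.length) 0
                  · rw [if_pos ha, if_pos]
                    rw [hvp, ← ha]
                  · rw [if_neg ha, if_neg]
                    intro h
                    apply ha
                    have h2 : a = PySem.List.pyGetD p
                        (PySem.Int.mod ((s % 40 : Nat) : Int) (p.length : Int)) 0 :=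
                      congrArg Prod.snd h
                    exact h2.trans hvp
                · rw [if_neg hks, if_neg]
                  intro h
                  apply hks
                  have h2 := congrArg Prod.fst h
                  simp only [hm40] at h2
                  have h3 : s % 40 = k := by exact_mod_cast h2
                  exact h3.symm
              rw [List.map_congr_left hterm]
              rw [sum_range_point _ 40 (s % 40) (Nat.mod_lt _ (by omega))]
              by_cases h : a = p.getD (s % p.length) 0
              · rw [if_pos h, if_pos h.symm]
              · rw [if_neg h, if_neg (fun e => h e.symm)]
            rw [hind]
            ring

lemma final_eq (a b c : Int) :
    (PySem.List.enumerate [a, b, c]).foldl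
      (fun acc p => if p.2 = (PySem.List.max? [a, b, c] (fun y => y)).getD 0 then acc ++ [p.1 + 1] else acc) [] =
    ((PySem.List.enumerate [a, b, c]).filter
      (fun p => p.2 == (PySem.List.max? [a, b, c] (fun y => y)).getD 0)).map (fun p => p.1 + 1) := by
  simp only [PySem.List.enumerate_cons, PySem.List.enumerate_nil]
  set M := (PySem.List.max? [a, b, c] (fun y => y)).getD 0 with hM
  simp only [List.foldl_cons, List.foldl_nil, List.filter_cons, List.filter_nil]
  by_cases h1 : a = M <;> by_cases h2 : b = M <;> by_cases h3 : c = M <;>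
    simp [h1, h2, h3]

lemma scoreAlt_eq' (p : List Int) (hdvd : p.length ∣ 40) (ans : List Int) :
    scoreAlt (countsB ans) p = scoreB p ans 0 := by
  unfold scoreAlt
  have := scoreAlt_eq p hdvd ans 0
  simp only [Nat.cast_zero] at this
  rw [← this]
  apply congrArg List.sum
  apply List.map_congr_left
  intro r _
  rw [countsB_getD]

-- ===== VERDICT (by name: the statement is the Claim_ definition above) =====
theorem solution_spec : Claim_equal_solution := by
  intro answers _
  show solution answers = solution_alt answers
  unfold solution solution_alt
  simp only [loopA_eq, patternsB, List.map]
  rw [scoreAlt_eq' [1,2,3,4,5] (by norm_num) answers,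
      scoreAlt_eq' [2,1,2,3,2,4,2,5] (by norm_num) answers,
      scoreAlt_eq' [3,3,1,1,2,2,4,4,5,5] (by norm_num) answers]
  have e2 : pySecond = [2,1, 2,3, 2,4, 2,5] := rfl
  have e3 : pyThird = [3,3, 1,1, 2,2, 4,4, 5,5] := rfl
  rw [e2, e3]
  simpa using final_eq (scoreB [1,2,3,4,5] answers 0) (scoreB [2,1,2,3,2,4,2,5] answers 0)
    (scoreB [3,3,1,1,2,2,4,4,5,5] answers 0)
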